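-- pv_equiv track=rewrite | github.com/WisselsLaurens1/recipe_classifier | scripts/tools.py | create_voc
-- ===== SOURCE A (Python) =====
-- def create_voc(x: list) -> list:
--     voc = []
--     for sample in x:
--         for word in sample:
--             voc.append(word)
--
--     voc = list(set(voc))
--     voc.sort(reverse=True)
--     return voc
-- ===== SOURCE B (Python) =====
-- def create_voc(x: list) -> list:
--     voc = []
--     for sample in x:
--         voc += sample
--     voc.sort(reverse=True)
--     out = []
--     prev = None
--     for w in voc:
--         if w != prev:
--             out.append(w)
--             prev = w
--     return out
-- ===== Notes on version B (the rewrite author's own statement) =====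
-- stated objective: alternative
-- what changed: B flattens with list concatenation, sorts the full flattened list descending first, and deduplicates in one adjacent-scan pass tracking the previously emitted word, instead of A's hash-set deduplication before sorting.
import Mathlib
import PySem

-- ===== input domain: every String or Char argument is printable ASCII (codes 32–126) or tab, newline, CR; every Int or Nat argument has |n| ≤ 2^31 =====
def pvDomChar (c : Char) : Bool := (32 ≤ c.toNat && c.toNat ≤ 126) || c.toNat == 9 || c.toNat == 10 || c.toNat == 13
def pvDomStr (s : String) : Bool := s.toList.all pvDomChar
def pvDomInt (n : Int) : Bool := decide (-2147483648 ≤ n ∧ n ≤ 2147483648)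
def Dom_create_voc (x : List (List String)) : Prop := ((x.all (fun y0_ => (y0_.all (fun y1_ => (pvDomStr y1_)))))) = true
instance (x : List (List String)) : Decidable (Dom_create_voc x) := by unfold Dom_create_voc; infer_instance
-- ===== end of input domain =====

-- B sorts the full flattened list descending first and dedups by a single adjacent scan (previous-element tracking) instead of A's set-based dedup before sorting; same cost, different decomposition.


-- ===== PORT A =====
-- flatten by nested append loops; list(set(voc)) then .sort(reverse=True):
-- the set's iteration order is consumed only by the sort (no key ties), so sorting the Set is exact.
def create_voc (x : List (List String)) : List String :=
  let voc := x.foldl (fun voc sample => sample.foldl (fun v w => v ++ [w]) voc) []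
  PySem.List.sorted (PySem.Set.ofList voc) (fun s => s) true

-- ===== PORT B =====
def create_voc_alt (x : List (List String)) : List String :=
  let voc := x.foldl (fun voc sample => voc ++ sample) []
  let voc := PySem.List.sorted voc (fun s => s) true
  (voc.foldl (fun st w => if st.2 ≠ some w then (st.1 ++ [w], some w) else st)
    (([] : List String), (none : Option String))).1

-- ===== PRECONDITION & SPEC =====
def Spec_create_voc (x : List (List String)) (out : List String) : Prop := out = create_voc_alt x
instance (x : List (List String)) (out : List String) : Decidable (Spec_create_voc x out) := by unfold Spec_create_voc; infer_instance

-- ===== CLAIM (what is proved, stated in full; the proofs are below) =====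
def Claim_equal_create_voc : Prop := ∀ (x : List (List String)), Dom_create_voc x → Spec_create_voc x (create_voc x)

-- ===== LEMMAS AND PROOFS =====

-- A's inner append loop is list concatenation
theorem pv_flat_inner (sample voc : List String) :
    sample.foldl (fun v w => v ++ [w]) voc = voc ++ sample := by
  induction sample generalizing voc with
  | nil => simp
  | cons w ws ih => simp [List.foldl, ih]

theorem pv_flat_eq_gen (x : List (List String)) (acc : List String) :
    x.foldl (fun voc sample => sample.foldl (fun v w => v ++ [w]) voc) acc =
    x.foldl (fun voc sample => voc ++ sample) acc := by
  induction x generalizing acc with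
  | nil => rfl
  | cons s xs ih => rw [List.foldl_cons, List.foldl_cons, pv_flat_inner]; exact ih _

-- recursive form of B's adjacent-dedup scan
def pvG (prev : Option String) : List String → List String
  | [] => []
  | w :: ws => if prev ≠ some w then w :: pvG (some w) ws else pvG prev ws

theorem pv_fold_g (l : List String) (out : List String) (prev : Option String) :
    (l.foldl (fun st w => if st.2 ≠ some w then (st.1 ++ [w], some w) else st) (out, prev)).1
      = out ++ pvG prev l := by
  induction l generalizing out prev with
  | nil => simp [pvG]
  | cons w ws ih =>
    rw [List.foldl_cons]
    dsimp only
    by_cases h : prev = some w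
    · rw [if_neg (by simp [h]), pvG, if_neg (by simp [h]), h]
      exact ih out (some w)
    · rw [if_pos h, pvG, if_pos h, ih, List.append_assoc]
      rfl

theorem pv_g_spec (l : List String) (prev : Option String)
    (hp : l.Pairwise (fun a b => b ≤ a))
    (hb : ∀ p, prev = some p → ∀ y ∈ l, y ≤ p) :
    (∀ z, z ∈ pvG prev l ↔ z ∈ l ∧ prev ≠ some z) ∧
    (pvG prev l).Pairwise (fun a b => b < a) ∧
    (∀ p, prev = some p → ∀ y ∈ pvG prev l, y < p) := by
  induction l generalizing prev with
  | nil => simp [pvG]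
  | cons w ws ih =>
    rcases List.pairwise_cons.mp hp with ⟨hw, hpw⟩
    have hb' : ∀ p, (some w : Option String) = some p → ∀ y ∈ ws, y ≤ p := by
      rintro p hpq y hy; cases hpq; exact hw y hy
    obtain ⟨ihm, ihp, ihlt⟩ := ih (some w) hpw hb'
    by_cases h : prev = some w
    · subst h
      have hg : pvG (some w) (w :: ws) = pvG (some w) ws := by
        rw [pvG, if_neg (fun hc => hc rfl)]
      refine ⟨?_, ?_, ?_⟩
      · intro z
        rw [hg, ihm z, List.mem_cons]
        constructor
        · rintro ⟨hz1, hz2⟩; exact ⟨Or.inr hz1, hz2⟩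
        · rintro ⟨hz1, hz2⟩
          rcases hz1 with rfl | hz1
          · exact absurd rfl hz2
          · exact ⟨hz1, hz2⟩
      · rw [hg]; exact ihp
      · rintro p hpq y hy
        cases hpq
        rw [hg] at hy
        exact ihlt _ rfl y hy
    · have hg : pvG prev (w :: ws) = w :: pvG (some w) ws := by
        rw [pvG, if_pos h]
      refine ⟨?_, ?_, ?_⟩
      · intro z
        rw [hg, List.mem_cons, List.mem_cons]
        constructor
        · intro hz
          rcases hz with rfl | hz
          · exact ⟨Or.inl rfl, fun hc => h hc⟩
          · rcases (ihm z).mp hz with ⟨hz1, hz2⟩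
            refine ⟨Or.inr hz1, ?_⟩
            intro hc
            -- prev = some z with z ∈ ws, z ≠ w: then z ≤ w and w ≤ z force z = w
            have hzw : z ≤ w := hw z hz1
            have hwz : w ≤ z := hb z hc w List.mem_cons_self
            have hzz : z = w := le_antisymm hzw hwz
            exact h (hzz ▸ hc)
        · rintro ⟨hz1, hz2⟩
          rcases hz1 with rfl | hz1
          · exact Or.inl rfl
          · by_cases hzw : z = w
            · exact Or.inl hzw
            · exact Or.inr ((ihm z).mpr ⟨hz1, fun hc => hzw (Option.some_injective _ hc).symm⟩)
      · rw [hg, List.pairwise_cons]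
        exact ⟨fun y hy => ihlt w rfl y hy, ihp⟩
      · rintro p hpq y hy
        rw [hg] at hy
        have hwp : w < p := by
          have hle : w ≤ p := hb p hpq w List.mem_cons_self
          have hne : w ≠ p := fun hc => h (by rw [hpq, hc])
          exact lt_of_le_of_ne hle hne
        rcases List.mem_cons.mp hy with rfl | hy
        · exact hwp
        · exact lt_trans (ihlt w rfl y hy) hwp

-- ===== VERDICT (by name: the statement is the Claim_ definition above) =====
theorem create_voc_spec : Claim_equal_create_voc := by
  intro x _
  unfold Spec_create_voc create_voc create_voc_alt
  rw [pv_fold_g, ← pv_flat_eq_gen]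
  set voc := x.foldl (fun voc sample => sample.foldl (fun v w => v ++ [w]) voc) [] with hvoc
  simp only [List.nil_append]
  have hs := PySem.List.sorted_pairwise_rev (xs := voc) (key := fun s => s)
  obtain ⟨hm, hpg, _⟩ := pv_g_spec (PySem.List.sorted voc (fun s => s) true) none hs (by simp)
  apply PySem.List.sorted_rev_eq_of_perm_of_pairwise_gt _ _ _ ?_ hpg
  rw [List.perm_ext_iff_of_nodup (hpg.imp (fun h => (ne_of_lt h).symm)) (PySem.Set.nodup_ofList voc)]
  intro z
  rw [hm z, PySem.Set.mem_ofList, PySem.List.mem_sorted]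
  simp
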